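-- pv_equiv track=rewrite | github.com/SAG145/Project-Euler | PEP103 - Special Subset Sums_ Optimum.py | all_sss
-- ===== SOURCE A (Python) =====
-- def subgroups(lst):
--     if len(lst) == 1:
--         return [lst,[]]
--     subg = []
--     subs = subgroups(lst[1:])
--     subg += subs
--     a = [lst[0]]
--     for g in subs:
--         subg.append(a + g)
--     return subg
--
-- def rule1(set):
--     sums = []
--     subs = subgroups(set)
--     subs.remove([])
--     subs.remove(set)
--     for g in subs:
--         sums.append((len(g),sum(g)))
--     sums = list(dict.fromkeys(sums))
--     return len(sums) == 2**len(set) - 2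
--
-- def new_sss(sss,k):
--     sss1 = [k]
--     for i in sss:
--        sss1.append(i + k)
--     return sss1
--
-- def all_sss(len1,sss_list):
--     if len1 >= len(sss_list):
--         sss_len1 = []
--         sss = all_sss(len1 - 1,sss_list)
--         for sss1 in sss:
--             for k in range(1,sss1[-1] + 2):
--                 new = new_sss(sss1,k)
--                 if rule1(new):
--                     sss_len1.append(new)
--         return sss_len1
--     return sss_list[len1]
-- ===== SOURCE B (Python) =====
-- def all_sss(len1, sss_list):
--     if len1 < len(sss_list):
--         return sss_list[len1]
--     out = []
--     for sss1 in all_sss(len1 - 1, sss_list):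
--         for k in range(1, sss1[-1] + 2):
--             new = [k] + [i + k for i in sss1]
--             n = len(new)
--             seen = set()
--             for mask in range(1, 2 ** n - 1):
--                 c = 0
--                 s = 0
--                 m = mask
--                 for v in new:
--                     if m % 2 == 1:
--                         c += 1
--                         s += v
--                     m //= 2
--                 seen.add((c, s))
--             if len(seen) == 2 ** n - 2:
--                 out.append(new)
--     return out
-- ===== Notes on version B (the rewrite author's own statement) =====
-- stated objective: alternative
-- what changed: rule1's recursive powerset list builder (subgroups), the two list .remove passes and the dict.fromkeys dedup are replaced by a single bitmask sweep over masks 1..2^n-2 that computes each subset's (size,sum) pair directly into a set; new_sss is inlined as a comprehension.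
import Mathlib
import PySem

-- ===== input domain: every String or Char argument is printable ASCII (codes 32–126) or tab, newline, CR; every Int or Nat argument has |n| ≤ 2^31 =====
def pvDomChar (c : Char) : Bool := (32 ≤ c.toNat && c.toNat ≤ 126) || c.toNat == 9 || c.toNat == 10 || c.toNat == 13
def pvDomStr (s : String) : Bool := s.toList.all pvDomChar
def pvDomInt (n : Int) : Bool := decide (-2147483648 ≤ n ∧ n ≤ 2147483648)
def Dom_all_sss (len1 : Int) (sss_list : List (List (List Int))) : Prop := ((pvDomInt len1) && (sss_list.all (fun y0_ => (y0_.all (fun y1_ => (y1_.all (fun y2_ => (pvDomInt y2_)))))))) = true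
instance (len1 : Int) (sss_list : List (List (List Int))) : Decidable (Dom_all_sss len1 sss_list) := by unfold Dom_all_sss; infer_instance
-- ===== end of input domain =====

-- B replaces the recursive powerset builder + list .remove + dict.fromkeys dedup of rule1 by a
-- single bitmask sweep collecting (size, sum) pairs in a set; the outer recursion is kept.

-- ===== PORT A =====
def subgroups : List Int → List (List Int)
  | [] => []            -- unreachable from all_sss: Python's subgroups is only called on nonempty lists
  | [x] => [[x], []]
  | x :: y :: rest =>
      let subs := subgroups (y :: rest)
      subs ++ subs.map (fun g => [x] ++ g)

def rule1 (s : List Int) : Bool :=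
  let subs := subgroups s
  let subs := (PySem.List.remove? subs []).getD []   -- [] is always present (Pre_); Python raises ValueError otherwise
  let subs := (PySem.List.remove? subs s).getD []
  let sums := subs.foldl (fun acc g => acc ++ [((g.length : Int), g.sum)]) ([] : List (Int × Int))
  let sums := PySem.List.dedup sums                   -- list(dict.fromkeys(sums))
  decide ((sums.length : Int) = (2 : Int) ^ s.length - 2)

def new_sss (sss : List Int) (k : Int) : List Int :=
  sss.foldl (fun acc i => acc ++ [i + k]) [k]

def all_sss (len1 : Int) (sss_list : List (List (List Int))) : List (List Int) :=
  if _h : len1 ≥ (sss_list.length : Int) then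
    let sss := all_sss (len1 - 1) sss_list
    sss.foldl (fun acc sss1 =>
      (PySem.List.pyRange 1 (PySem.List.pyGetD sss1 (-1) 0 + 2) 1).foldl
        (fun acc2 k =>
          let new := new_sss sss1 k
          if rule1 new then acc2 ++ [new] else acc2) acc) []
  else PySem.List.pyGetD sss_list len1 []      -- index always in range under Pre_
termination_by (len1 + 1 - sss_list.length).toNat
decreasing_by omega

-- ===== PORT B =====
def rule1_alt (new : List Int) : Bool :=
  let n := new.length
  let seen := (PySem.List.pyRange 1 ((2 : Int) ^ n - 1) 1).foldl
    (fun seen mask =>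
      let t := new.foldl (fun st v =>
          if PySem.Int.mod st.2.2 2 == 1 then (st.1 + 1, st.2.1 + v, PySem.Int.floordiv st.2.2 2)
          else (st.1, st.2.1, PySem.Int.floordiv st.2.2 2)) ((0 : Int), (0 : Int), mask)
      PySem.Set.add seen (t.1, t.2.1)) PySem.Set.empty
  decide ((seen.length : Int) = (2 : Int) ^ n - 2)

def all_sss_alt (len1 : Int) (sss_list : List (List (List Int))) : List (List Int) :=
  if _h : len1 < (sss_list.length : Int) then PySem.List.pyGetD sss_list len1 []
  else
    (all_sss_alt (len1 - 1) sss_list).foldl (fun out sss1 =>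
      (PySem.List.pyRange 1 (PySem.List.pyGetD sss1 (-1) 0 + 2) 1).foldl
        (fun out2 k =>
          let new := k :: sss1.map (fun i => i + k)
          if rule1_alt new then out2 ++ [new] else out2) out) []
termination_by (len1 + 1 - sss_list.length).toNat
decreasing_by omega

-- ===== PRECONDITION & SPEC =====
-- Pre_ excludes exactly the inputs where the Python A raises: an empty sss_list or len1 below
-- -len(sss_list) (IndexError on sss_list[len1]), and len1 ≥ len(sss_list) while the last element
-- of sss_list contains an empty set (IndexError on sss1[-1] at the recursion base).
def Pre_all_sss (len1 : Int) (sss_list : List (List (List Int))) : Prop :=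
  sss_list ≠ [] ∧ -(sss_list.length : Int) ≤ len1 ∧
    ((sss_list.length : Int) ≤ len1 → ∀ sss1 ∈ sss_list.getLastD [], sss1 ≠ [])
instance (len1 : Int) (sss_list : List (List (List Int))) : Decidable (Pre_all_sss len1 sss_list) := by unfold Pre_all_sss; infer_instance

def pvWitness_all_sss : Int × List (List (List Int)) := (0, [[[1]]])

def Spec_all_sss (len1 : Int) (sss_list : List (List (List Int))) (out : List (List Int)) : Prop := out = all_sss_alt len1 sss_list
instance (len1 : Int) (sss_list : List (List (List Int))) (out : List (List Int)) : Decidable (Spec_all_sss len1 sss_list out) := by unfold Spec_all_sss; infer_instance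

-- ===== CLAIM (what is proved, stated in full; the proofs are below) =====
def Claim_equal_all_sss : Prop := ∀ (len1 : Int) (sss_list : List (List (List Int))), Dom_all_sss len1 sss_list → Pre_all_sss len1 sss_list → Spec_all_sss len1 sss_list (all_sss len1 sss_list)

-- ===== LEMMAS AND PROOFS =====

-- the sublist of s selected by the low bits of the mask m (bit 0 = head)
def selN : List Int → Nat → List Int
  | [], _ => []
  | v :: r, m => (if m % 2 = 1 then [v] else []) ++ selN r (m / 2)

theorem selN_zero (s : List Int) : selN s 0 = [] := by
  induction s with
  | nil => rfl
  | cons v r ih => simp [selN, ih]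

theorem selN_length_le (s : List Int) (m : Nat) : (selN s m).length ≤ s.length := by
  induction s generalizing m with
  | nil => simp [selN]
  | cons v r ih =>
      have h := ih (m / 2)
      simp only [selN, List.length_append, List.length_cons]
      split <;> simp <;> omega

theorem selN_full (s : List Int) : selN s (2 ^ s.length - 1) = s := by
  induction s with
  | nil => rfl
  | cons v r ih =>
      have h1 : (1 : Nat) ≤ 2 ^ r.length := Nat.one_le_two_pow
      have hm : (2 ^ (r.length + 1) - 1) % 2 = 1 := by rw [pow_succ]; omega
      have hd : (2 ^ (r.length + 1) - 1) / 2 = 2 ^ r.length - 1 := by rw [pow_succ]; omega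
      simp [selN, hm, hd, ih]

theorem selN_ne_self (s : List Int) (m : Nat) (h : m < 2 ^ s.length - 1) : selN s m ≠ s := by
  induction s generalizing m with
  | nil => simp at h
  | cons v r ih =>
      have h1 : (1 : Nat) ≤ 2 ^ r.length := Nat.one_le_two_pow
      intro he
      rcases Nat.mod_two_eq_zero_or_one m with hm | hm
      · have hl := selN_length_le r (m / 2)
        simp [selN, hm] at he
        have hlen := congrArg List.length he
        simp at hlen; omega
      · simp [selN, hm] at he
        by_cases hlt : m / 2 < 2 ^ r.length - 1
        · exact ih (m / 2) hlt he
        · simp only [List.length_cons, pow_succ] at h; omega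

theorem selN_even (x : Int) (r : List Int) (m : Nat) : selN (x :: r) (2 * m) = selN r m := by
  have h1 : 2 * m % 2 = 0 := Nat.mul_mod_right 2 m
  have h2 : 2 * m / 2 = m := by omega
  simp [selN, h1, h2]

theorem selN_odd (x : Int) (r : List Int) (m : Nat) : selN (x :: r) (2 * m + 1) = x :: selN r m := by
  have h1 : (2 * m + 1) % 2 = 1 := by omega
  have h2 : (2 * m + 1) / 2 = m := by omega
  simp [selN, h1, h2]

theorem range_two_mul_perm (K : Nat) :
    (List.range (2 * K)).Perm
      ((List.range K).map (fun m => 2 * m) ++ (List.range K).map (fun m => 2 * m + 1)) := by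
  induction K with
  | zero => simp
  | succ K ih =>
      have e1 : 2 * (K + 1) = (2 * K + 1) + 1 := by omega
      rw [e1, List.range_succ, List.range_succ, List.range_succ]
      simp only [List.map_append, List.map_cons, List.map_nil]
      have h : ((List.range (2 * K)) : Multiset Nat)
          = ((List.range K).map (fun m => 2 * m) : Multiset Nat)
            + ((List.range K).map (fun m => 2 * m + 1) : Multiset Nat) := by
        rw [Multiset.coe_add, Multiset.coe_eq_coe]; exact ih
      rw [← Multiset.coe_eq_coe]
      simp only [← Multiset.coe_add]
      rw [h]; abel

theorem subgroups_perm (s : List Int) (hs : s ≠ []) :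
    (subgroups s).Perm ((List.range (2 ^ s.length)).map (selN s)) := by
  induction s with
  | nil => exact absurd rfl hs
  | cons x r ih =>
      match r with
      | [] =>
          show ([[x], []] : List (List Int)).Perm _
          have h : (List.range (2 ^ ([x] : List Int).length)).map (selN [x]) = [[], [x]] := by
            norm_num [List.range_succ, selN]
          rw [h]
          exact List.Perm.swap _ _ _
      | y :: rest =>
          have ihr := ih (by simp)
          show ((subgroups (y :: rest)) ++ (subgroups (y :: rest)).map (fun g => [x] ++ g)).Perm _
          have hsplit := (range_two_mul_perm (2 ^ (y :: rest).length)).map (selN (x :: y :: rest))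
          simp only [List.map_append, List.map_map] at hsplit
          have hlen : 2 ^ (x :: y :: rest).length = 2 * 2 ^ (y :: rest).length := by
            simp [pow_succ]; ring
          rw [hlen]
          refine List.Perm.trans ?_ hsplit.symm
          have heq1 : (List.range (2 ^ (y :: rest).length)).map (selN (x :: y :: rest) ∘ (fun m => 2 * m))
              = (List.range (2 ^ (y :: rest).length)).map (selN (y :: rest)) := by
            refine List.map_congr_left ?_
            intro a _; exact selN_even x (y :: rest) a
          have heq2 : (List.range (2 ^ (y :: rest).length)).map (selN (x :: y :: rest) ∘ (fun m => 2 * m + 1))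
              = (List.range (2 ^ (y :: rest).length)).map (fun m => x :: selN (y :: rest) m) := by
            refine List.map_congr_left ?_
            intro a _; exact selN_odd x (y :: rest) a
          rw [heq1, heq2]
          refine List.Perm.append ihr ?_
          have hmm : (List.range (2 ^ (y :: rest).length)).map (fun m => x :: selN (y :: rest) m)
              = ((List.range (2 ^ (y :: rest).length)).map (selN (y :: rest))).map (fun g => [x] ++ g) := by
            rw [List.map_map]; rfl
          rw [hmm]
          exact ihr.map _

-- the B-side inner fold computes the (size, sum) pair of the selected sublist
theorem foldB (l : List Int) (m : Nat) (c t : Int) :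
    l.foldl (fun st v =>
        if PySem.Int.mod st.2.2 2 == 1 then (st.1 + 1, st.2.1 + v, PySem.Int.floordiv st.2.2 2)
        else (st.1, st.2.1, PySem.Int.floordiv st.2.2 2)) ((c, t, (m : Int)) : Int × Int × Int)
      = (c + ((selN l m).length : Int), t + (selN l m).sum, ((m / 2 ^ l.length : Nat) : Int)) := by
  induction l generalizing m c t with
  | nil => simp [selN]
  | cons v r ih =>
      have hmod : PySem.Int.mod ((m : Int)) 2 = ((m % 2 : Nat) : Int) := by
        exact_mod_cast PySem.Int.mod_natCast m 2
      have hdiv : PySem.Int.floordiv ((m : Int)) 2 = ((m / 2 : Nat) : Int) := by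
        exact_mod_cast PySem.Int.floordiv_natCast m 2
      have hdd : m / 2 / 2 ^ r.length = m / 2 ^ (r.length + 1) := by
        rw [Nat.div_div_eq_div_mul, pow_succ']
      rcases Nat.mod_two_eq_zero_or_one m with hm | hm
      · have hsel : selN (v :: r) m = selN r (m / 2) := by simp [selN, hm]
        rw [List.foldl_cons]
        show List.foldl _ (if (PySem.Int.mod ((m : Int)) 2 == 1) = true then _ else _) r = _
        rw [hmod, hm, if_neg (by decide)]
        dsimp only
        rw [hdiv, ih, hsel, List.length_cons, hdd]
      · have hsel : selN (v :: r) m = v :: selN r (m / 2) := by simp [selN, hm]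
        rw [List.foldl_cons]
        show List.foldl _ (if (PySem.Int.mod ((m : Int)) 2 == 1) = true then _ else _) r = _
        rw [hmod, hm, if_pos (by decide)]
        dsimp only
        rw [hdiv, ih, hsel, List.length_cons, hdd]
        simp [Prod.ext_iff]
        constructor <;> ring

theorem setLen_of_perm {α : Type} [BEq α] [LawfulBEq α] {xs ys : List α} (h : xs.Perm ys) :
    (PySem.Set.ofList xs).length = (PySem.Set.ofList ys).length := by
  have hp : (PySem.Set.ofList xs).Perm (PySem.Set.ofList ys) := by
    rw [List.perm_ext_iff_of_nodup (PySem.Set.nodup_ofList xs) (PySem.Set.nodup_ofList ys)]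
    intro a
    simp only [PySem.Set.mem_ofList]
    exact h.mem_iff
  exact hp.length_eq

-- a loop adding f(x) to a set is set(map f l)
theorem setAdd_foldl_ofList {α β : Type} [BEq α] (l : List β) (f : β → α) :
    l.foldl (fun s x => PySem.Set.add s (f x)) PySem.Set.empty = PySem.Set.ofList (l.map f) := by
  rw [PySem.Set.ofList_eq_foldl, List.foldl_map]; rfl

theorem range_decomp (K : Nat) (h : 2 ≤ K) :
    List.range K = 0 :: (((List.range (K - 2)).map (fun k => k + 1)) ++ [K - 1]) := by
  conv_lhs => rw [show K = (K - 1) + 1 from by omega]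
  rw [List.range_succ]
  conv_lhs => rw [show K - 1 = (K - 2) + 1 from by omega]
  rw [List.range_succ_eq_map]
  simp
  omega

theorem rule1_eq (s : List Int) (hs : s ≠ []) : rule1 s = rule1_alt s := by
  have hn : 1 ≤ s.length := List.length_pos_of_ne_nil hs
  have hK : 2 ≤ 2 ^ s.length := by
    calc (2 : Nat) = 2 ^ 1 := by norm_num
    _ ≤ 2 ^ s.length := Nat.pow_le_pow_right (by norm_num) hn
  have p0 := subgroups_perm s hs
  have hmem0 : ([] : List Int) ∈ subgroups s := by
    rw [p0.mem_iff]
    exact List.mem_map.2 ⟨0, by simp [List.mem_range], selN_zero s⟩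
  have hmemsFull : s ∈ subgroups s := by
    rw [p0.mem_iff]
    exact List.mem_map.2 ⟨2 ^ s.length - 1, by simp [List.mem_range], selN_full s⟩
  have r1 : PySem.List.remove? (subgroups s) [] = some ((subgroups s).erase []) :=
    PySem.List.remove?_eq_some_erase _ _ hmem0
  have hmems : s ∈ (subgroups s).erase [] := (List.mem_erase_of_ne hs).2 hmemsFull
  have r2 : PySem.List.remove? ((subgroups s).erase []) s
      = some (((subgroups s).erase []).erase s) :=
    PySem.List.remove?_eq_some_erase _ _ hmems
  have hmapR : (List.range (2 ^ s.length)).map (selN s)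
      = [] :: (((List.range (2 ^ s.length - 2)).map (fun k => selN s (k + 1))) ++ [s]) := by
    rw [range_decomp _ hK]
    simp [List.map_map, Function.comp_def, selN_zero, selN_full]
  have hnotmem : s ∉ (List.range (2 ^ s.length - 2)).map (fun k => selN s (k + 1)) := by
    intro hmem
    obtain ⟨k, hk, he⟩ := List.mem_map.1 hmem
    rw [List.mem_range] at hk
    exact selN_ne_self s (k + 1) (by omega) he
  have hR : (((List.range (2 ^ s.length)).map (selN s)).erase ([] : List Int)).erase s
      = (List.range (2 ^ s.length - 2)).map (fun k => selN s (k + 1)) := by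
    rw [hmapR, List.erase_cons_head, List.erase_append_right _ hnotmem]
    simp
  have pA : ((((subgroups s).erase []).erase s).map (fun g => ((g.length : Int), g.sum))).Perm
      ((List.range (2 ^ s.length - 2)).map
        (fun k => (((selN s (k + 1)).length : Int), (selN s (k + 1)).sum))) := by
    have hp := ((p0.erase ([] : List Int)).erase s).map (fun g => ((g.length : Int), g.sum))
    rw [hR] at hp
    simpa [List.map_map, Function.comp_def] using hp
  have hmasks : PySem.List.pyRange 1 ((2 : Int) ^ s.length - 1) 1
      = (List.range (2 ^ s.length - 2)).map (fun k => ((k + 1 : Nat) : Int)) := by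
    rw [PySem.List.pyRange_one]
    have hcast : ((2 ^ s.length : Nat) : Int) = (2 : Int) ^ s.length := by push_cast; ring
    have ht : ((2 : Int) ^ s.length - 1 - 1).toNat = 2 ^ s.length - 2 := by omega
    rw [ht]
    refine List.map_congr_left ?_
    intro k _
    push_cast; ring
  simp only [rule1, rule1_alt, r1, r2, Option.getD_some,
    PySem.List.foldl_append_singleton_eq_map, List.nil_append,
    PySem.List.dedup_eq_ofList, setAdd_foldl_ofList, hmasks, List.map_map]
  have hpair : ∀ k : Nat, k ∈ List.range (2 ^ s.length - 2) →
      ((fun mask => ((s.foldl (fun st v =>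
          if PySem.Int.mod st.2.2 2 == 1 then (st.1 + 1, st.2.1 + v, PySem.Int.floordiv st.2.2 2)
          else (st.1, st.2.1, PySem.Int.floordiv st.2.2 2)) ((0 : Int), (0 : Int), mask)).1,
          (s.foldl (fun st v =>
          if PySem.Int.mod st.2.2 2 == 1 then (st.1 + 1, st.2.1 + v, PySem.Int.floordiv st.2.2 2)
          else (st.1, st.2.1, PySem.Int.floordiv st.2.2 2)) ((0 : Int), (0 : Int), mask)).2.1))
        ∘ (fun k : Nat => ((k + 1 : Nat) : Int))) k
      = (((selN s (k + 1)).length : Int), (selN s (k + 1)).sum) := by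
    intro k _
    simp only [Function.comp_apply]
    rw [foldB]
    simp
  rw [List.map_congr_left hpair]
  rw [setLen_of_perm pA]

theorem new_sss_eq (sss : List Int) (k : Int) : new_sss sss k = k :: sss.map (fun i => i + k) := by
  rw [new_sss, PySem.List.foldl_append_singleton_eq_map]; rfl

theorem all_sss_eq (len1 : Int) (sss_list : List (List (List Int))) :
    all_sss len1 sss_list = all_sss_alt len1 sss_list := by
  rw [all_sss, all_sss_alt]
  by_cases h : len1 ≥ (sss_list.length : Int)
  · rw [dif_pos h, dif_neg (by omega)]
    rw [all_sss_eq (len1 - 1)]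
    dsimp only
    apply PySem.List.foldl_congr_mem
    intro acc sss1 _
    apply PySem.List.foldl_congr_mem
    intro acc2 k _
    dsimp only
    rw [new_sss_eq, rule1_eq _ (by simp)]
  · rw [dif_neg h, dif_pos (by omega)]
termination_by (len1 + 1 - sss_list.length).toNat
decreasing_by omega

-- ===== VERDICT (by name: the statement is the Claim_ definition above) =====
theorem all_sss_spec : Claim_equal_all_sss := by
  intro len1 sss_list _ _
  unfold Spec_all_sss
  exact all_sss_eq len1 sss_list
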